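-- pv_equiv track=rewrite | github.com/mgaitan/telegram-acp-bot | src/telegram_acp_bot/telegram/bridge.py | _format_fenced_code
-- ===== SOURCE A (Python) =====
-- def _format_fenced_code(text: str) -> str:
--     max_backtick_run = 0
--     current_run = 0
--     for char in text:
--         if char == "`":
--             current_run += 1
--             max_backtick_run = max(max_backtick_run, current_run)
--             continue
--         current_run = 0
--
--     fence = "`" * max(3, max_backtick_run + 1)
--     return f"{fence}\n{text}\n{fence}"
-- ===== SOURCE B (Python) =====
-- def _format_fenced_code(text: str) -> str:
--     # Extract each maximal backtick run up front, then reduce with max.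
--     runs = []
--     rest = text
--     while rest:
--         if rest[0] == "`":
--             n = len(rest) - len(rest.lstrip("`"))
--             runs.append(n)
--             rest = rest[n:]
--         else:
--             rest = rest[1:]
--     max_run = max(runs, default=0)
--     fence = "`" * max(3, max_run + 1)
--     return f"{fence}\n{text}\n{fence}"
-- ===== Notes on version B (the rewrite author's own statement) =====
-- stated objective: alternative
-- what changed: Replaces the per-character current_run/max_backtick_run state machine with a find-maximal-runs-then-reduce decomposition: peel off each maximal backtick run (lstrip) into a list, then take max(runs, default=0).
import Mathlib
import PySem

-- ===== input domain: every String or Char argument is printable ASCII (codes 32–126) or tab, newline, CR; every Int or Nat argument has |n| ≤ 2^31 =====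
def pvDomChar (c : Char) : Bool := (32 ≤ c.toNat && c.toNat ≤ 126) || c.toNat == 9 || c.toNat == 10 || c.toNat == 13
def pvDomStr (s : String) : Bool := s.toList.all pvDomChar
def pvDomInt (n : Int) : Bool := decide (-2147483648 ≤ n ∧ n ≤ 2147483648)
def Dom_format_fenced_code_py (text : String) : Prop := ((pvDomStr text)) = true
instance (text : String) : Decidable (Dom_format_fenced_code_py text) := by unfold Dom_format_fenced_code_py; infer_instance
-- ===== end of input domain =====

-- B replaces A's per-character run-counter state machine by extracting the list of maximal
-- backtick runs and reducing it with max (alternative decomposition, same O(n) cost).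

-- ===== PORT A =====
-- the for-loop over text with state (max_backtick_run, current_run)
def pvLoopA : List Char → Nat → Nat → Nat
  | [], maxRun, _ => maxRun
  | ch :: rest, maxRun, cur =>
    if ch = '`' then pvLoopA rest (max maxRun (cur + 1)) (cur + 1)
    else pvLoopA rest maxRun 0

def format_fenced_code_py (text : String) : String :=
  let maxRun := pvLoopA text.toList 0 0
  let fence := List.replicate (max 3 (maxRun + 1)) '`'   -- "`" * max(3, max_backtick_run + 1)
  String.ofList (fence ++ '\n' :: text.toList ++ '\n' :: fence)   -- f"{fence}\n{text}\n{fence}" (exact: concatenation on the char list)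

-- ===== PORT B =====
-- the while-loop peeling maximal backtick runs off `rest`:
-- len(rest) - len(rest.lstrip("`")) is the leading-run length (takeWhile), rest[n:] drops it (dropWhile)
-- fuel (= initial length) only makes the structural recursion total; it is never exhausted
def pvRunsBGo : Nat → List Char → List Nat
  | _, [] => []
  | 0, _ :: _ => []
  | fuel + 1, c :: cs =>
    if c = '`' then
      ((c :: cs).takeWhile (· = '`')).length :: pvRunsBGo fuel ((c :: cs).dropWhile (· = '`'))
    else
      pvRunsBGo fuel cs

def pvRunsB (s : List Char) : List Nat := pvRunsBGo s.length s

def format_fenced_code_py_alt (text : String) : String :=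
  let runs := pvRunsB text.toList
  let maxRun := PySem.List.maxD runs (fun x => x) 0   -- max(runs, default=0)
  let fence := List.replicate (max 3 (maxRun + 1)) '`'
  String.ofList (fence ++ '\n' :: text.toList ++ '\n' :: fence)

-- ===== PRECONDITION & SPEC =====
def Spec_format_fenced_code_py (text : String) (out : String) : Prop := out = format_fenced_code_py_alt text
instance (text : String) (out : String) : Decidable (Spec_format_fenced_code_py text out) := by unfold Spec_format_fenced_code_py; infer_instance

-- ===== CLAIM (what is proved, stated in full; the proofs are below) =====
def Claim_equal_format_fenced_code_py : Prop := ∀ (text : String), Dom_format_fenced_code_py text → Spec_format_fenced_code_py text (format_fenced_code_py text)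

-- ===== LEMMAS AND PROOFS =====

-- the max backtick-run length over l, given a pending run of length c just before l
def pvPend : Nat → List Char → Nat
  | c, [] => c
  | c, ch :: l => if ch = '`' then pvPend (c + 1) l else max c (pvPend 0 l)

theorem pvPend_ge (l : List Char) (c : Nat) : c ≤ pvPend c l := by
  induction l generalizing c with
  | nil => simp [pvPend]
  | cons ch t ih =>
    simp only [pvPend]
    split
    · exact Nat.le_trans (Nat.le_succ c) (ih (c + 1))
    · exact Nat.le_max_left _ _

theorem pvLoopA_eq (l : List Char) (m c : Nat) (h : c ≤ m) :
    pvLoopA l m c = max m (pvPend c l) := by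
  induction l generalizing m c with
  | nil => simp [pvLoopA, pvPend, Nat.max_eq_left h]
  | cons ch t ih =>
    simp only [pvLoopA, pvPend]
    split
    · rw [ih (max m (c + 1)) (c + 1) (Nat.le_max_right _ _)]
      have := pvPend_ge t (c + 1)
      omega
    · rw [ih m 0 (Nat.zero_le _)]
      omega

theorem pvPend_take_drop (l : List Char) (c : Nat) :
    pvPend c l = max (c + (l.takeWhile (· = '`')).length)
                     (pvPend 0 (l.dropWhile (· = '`'))) := by
  induction l generalizing c with
  | nil => simp [pvPend]
  | cons ch t ih =>
    by_cases hch : ch = '`'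
    · rw [List.takeWhile_cons_of_pos (by simp [hch]), List.dropWhile_cons_of_pos (by simp [hch])]
      simp only [pvPend, if_pos hch, List.length_cons]
      rw [ih (c + 1)]
      omega
    · rw [List.takeWhile_cons_of_neg (by simp [hch]), List.dropWhile_cons_of_neg (by simp [hch])]
      simp only [pvPend, if_neg hch, List.length_nil, Nat.add_zero]
      omega

theorem pvMaxD_nat (xs : List Nat) :
    PySem.List.maxD xs (fun x => x) 0 = xs.foldl max 0 := by
  cases xs with
  | nil => rw [PySem.List.maxD_nil]; rfl
  | cons x t =>
    rw [PySem.List.maxD_id_cons, List.foldl_cons, Nat.zero_max]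

theorem pvFoldlMax (xs : List Nat) (a : Nat) : xs.foldl max a = max a (xs.foldl max 0) := by
  induction xs generalizing a with
  | nil => simp
  | cons x t ih =>
    simp only [List.foldl]
    rw [ih (max a x), ih (max 0 x)]
    omega

theorem pvRunsBGo_max (fuel : Nat) (l : List Char) (h : l.length ≤ fuel) :
    (pvRunsBGo fuel l).foldl max 0 = pvPend 0 l := by
  induction fuel generalizing l with
  | zero =>
    cases l with
    | nil => simp [pvRunsBGo, pvPend]
    | cons c cs => simp at h
  | succ fuel ih =>
    cases l with
    | nil => simp [pvRunsBGo, pvPend]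
    | cons c cs =>
      by_cases hc : c = '`'
      · rw [pvRunsBGo]
        simp only [if_pos hc]
        have hlen : ((c :: cs).dropWhile (· = '`')).length ≤ fuel := by
          rw [List.dropWhile_cons_of_pos (by simp [hc])]
          exact Nat.le_trans (List.length_dropWhile_le _ _) (by simpa using Nat.le_of_succ_le_succ h)
        rw [List.foldl_cons, pvFoldlMax, ih _ hlen, pvPend_take_drop (c :: cs) 0]
        omega
      · rw [pvRunsBGo]
        simp only [if_neg hc]
        rw [ih cs (by simpa using Nat.le_of_succ_le_succ h)]
        simp only [pvPend, if_neg hc]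
        omega

theorem pvRunsB_max (l : List Char) :
    (pvRunsB l).foldl max 0 = pvPend 0 l := by
  exact pvRunsBGo_max l.length l (Nat.le_refl _)

-- ===== VERDICT (by name: the statement is the Claim_ definition above) =====
theorem format_fenced_code_py_spec : Claim_equal_format_fenced_code_py := by
  intro text _
  unfold Spec_format_fenced_code_py format_fenced_code_py format_fenced_code_py_alt
  have h : pvLoopA text.toList 0 0 =
      PySem.List.maxD (pvRunsB text.toList) (fun x => x) 0 := by
    rw [pvMaxD_nat, pvRunsB_max, pvLoopA_eq _ 0 0 (Nat.le_refl 0)]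
    omega
  rw [h]
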